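-- pv_equiv track=rewrite | github.com/pavelgolikov/Python-Code | Old/Recursion practice easy and harder.py | array_220
-- ===== SOURCE A (Python) =====
-- def array_220(lst):
--    if len(lst) == 1:
--        return False
--    else:
--        if lst[-2]*10 == lst[-1]:
--            return True
--        else:
--            return False or array_220(lst[:-1])
-- ===== SOURCE B (Python) =====
-- def array_220(lst):
--     return any(a * 10 == b for a, b in zip(lst, lst[1:]))
-- ===== Notes on version B (the rewrite author's own statement) =====
-- stated objective: faster
-- what changed: replaces the tail recursion that re-slices lst[:-1] at every step (quadratic copying) with a single linear scan over adjacent pairs via zip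
-- outside the precondition, e.g. on array_220([]): A raises IndexError, B returns False
import Mathlib
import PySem

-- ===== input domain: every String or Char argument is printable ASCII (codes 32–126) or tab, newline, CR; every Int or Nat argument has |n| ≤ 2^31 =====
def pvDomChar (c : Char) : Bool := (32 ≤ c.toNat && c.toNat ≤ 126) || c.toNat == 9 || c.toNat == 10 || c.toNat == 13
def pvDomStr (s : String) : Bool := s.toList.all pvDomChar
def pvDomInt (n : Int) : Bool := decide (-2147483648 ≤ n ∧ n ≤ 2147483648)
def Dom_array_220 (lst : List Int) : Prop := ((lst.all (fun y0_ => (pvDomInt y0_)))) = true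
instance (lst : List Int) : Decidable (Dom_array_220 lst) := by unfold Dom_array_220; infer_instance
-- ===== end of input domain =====

-- B replaces A's tail recursion that copies lst[:-1] each step with one linear zip scan over adjacent pairs (asymptotically faster).


-- ===== PORT A =====
-- literal transliteration of A's recursion; lst[-2], lst[-1] via pyGet? (none = IndexError,
-- excluded by Pre_), lst[:-1] = dropLast
def array_220 (lst : List Int) : Bool :=
  if lst.length = 1 then false
  else
    if h2 : (PySem.List.pyGet? lst (-2)).getD 0 * 10 = (PySem.List.pyGet? lst (-1)).getD 0 then true
    else false || array_220 lst.dropLast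
termination_by lst.length
decreasing_by
  cases lst with
  | nil => simp [PySem.List.pyGet?] at h2
  | cons x xs => simp [List.length_dropLast]

-- ===== PORT B =====
def array_220_alt (lst : List Int) : Bool :=
  (lst.zip lst.tail).any (fun p => p.1 * 10 == p.2)

-- ===== PRECONDITION & SPEC =====
-- Pre_ excludes only the empty list, on which A raises IndexError (lst[-2]).
def Pre_array_220 (lst : List Int) : Prop := lst ≠ []
instance (lst : List Int) : Decidable (Pre_array_220 lst) := by unfold Pre_array_220; infer_instance
def pvWitness_array_220 : List Int := ([1, 10, 3])

def Spec_array_220 (lst : List Int) (out : Bool) : Prop := out = array_220_alt lst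
instance (lst : List Int) (out : Bool) : Decidable (Spec_array_220 lst out) := by unfold Spec_array_220; infer_instance

-- ===== CLAIM (what is proved, stated in full; the proofs are below) =====
def Claim_equal_array_220 : Prop := ∀ (lst : List Int), Dom_array_220 lst → Pre_array_220 lst → Spec_array_220 lst (array_220 lst)

-- ===== LEMMAS AND PROOFS =====

-- adjacent pairs of ys ++ [y] are the adjacent pairs of ys plus (last of ys, y)
theorem zipTail_append (ys : List Int) (y : Int) (h : ys ≠ []) :
    (ys ++ [y]).zip (ys ++ [y]).tail = ys.zip ys.tail ++ [(ys.getLast h, y)] := by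
  induction ys with
  | nil => exact absurd rfl h
  | cons c cs ih =>
    cases cs with
    | nil => simp [List.zip]
    | cons d ds =>
      have := ih (by simp)
      simp only [List.cons_append, List.tail_cons, List.zip] at this ⊢
      simp [this, List.getLast]

theorem array220_eq (lst : List Int) (h : lst ≠ []) : array_220 lst = array_220_alt lst := by
  induction lst using List.reverseRecOn with
  | nil => exact absurd rfl h
  | append_singleton ys y ih =>
    rcases eq_or_ne ys [] with rfl | hne
    · simp [array_220, array_220_alt]
    · have hlen : (ys ++ [y]).length ≠ 1 := by
        have : 1 ≤ ys.length := List.length_pos_iff.mpr hne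
        simp; omega
      have h2 : PySem.List.pyGet? (ys ++ [y]) (-1) = some y :=
        PySem.List.pyGet?_neg_one_append_singleton ys y
      have hl : ys.length - 1 < ys.length := by
        have : 1 ≤ ys.length := List.length_pos_iff.mpr hne
        omega
      have h1 : PySem.List.pyGet? (ys ++ [y]) (-2) = some (ys.getLast hne) := by
        rw [PySem.List.pyGet?_neg_ofNat (ys ++ [y]) 2 (by omega) (by simp; omega)]
        have : (ys ++ [y]).length - 2 = ys.length - 1 := by simp
        rw [this, List.getElem?_append_left hl, List.getElem?_eq_getElem hl,
          List.getLast_eq_getElem]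
      rw [array_220, if_neg hlen, h1, h2]
      have hdrop : (ys ++ [y]).dropLast = ys := by simp
      have halt : array_220_alt (ys ++ [y])
          = (array_220_alt ys || (ys.getLast hne * 10 == y)) := by
        unfold array_220_alt
        rw [zipTail_append ys y hne]
        simp
      rw [halt, ← ih hne]
      by_cases hc : ys.getLast hne * 10 = y
      · simp [hc]
      · simp [hc, hdrop]

-- ===== VERDICT (by name: the statement is the Claim_ definition above) =====
theorem array_220_spec : Claim_equal_array_220 := by
  intro lst _ hpre
  exact array220_eq lst hpre
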